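-- pv_equiv track=rewrite | github.com/medmax33/Survivor | level3.py | fill_field
-- ===== SOURCE A (Python) =====
-- def fill_field(N: int, M: int, battalion_pair: list) -> list:
--     # fill whole field with '0' and '1' - where battalion fall
--     state_square = []  # whole field M*N
--     for x in range(M):
--         row = []
--         for y in range(N):
--             if (y, x) in battalion_pair:
--                 row.append(1)
--             else:
--                 row.append(0)
--         state_square.append(row)
--     return state_square
-- ===== SOURCE B (Python) =====
-- def fill_field(N: int, M: int, battalion_pair: list) -> list:
--     # Build an all-zero M x N grid, then mark each in-range battalion cell once.
--     grid = [[0] * N for _ in range(M)]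
--     for col, row in battalion_pair:
--         if 0 <= col < N and 0 <= row < M:
--             grid[row][col] = 1
--     return grid
-- ===== Notes on version B (the rewrite author's own statement) =====
-- stated objective: alternative
-- what changed: A scans battalion_pair once per grid cell (membership test inside a double loop, O(M*N*len)); B builds an all-zero grid once and marks each in-range pair, a build-then-mark decomposition in O(M*N + len).
import Mathlib
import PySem

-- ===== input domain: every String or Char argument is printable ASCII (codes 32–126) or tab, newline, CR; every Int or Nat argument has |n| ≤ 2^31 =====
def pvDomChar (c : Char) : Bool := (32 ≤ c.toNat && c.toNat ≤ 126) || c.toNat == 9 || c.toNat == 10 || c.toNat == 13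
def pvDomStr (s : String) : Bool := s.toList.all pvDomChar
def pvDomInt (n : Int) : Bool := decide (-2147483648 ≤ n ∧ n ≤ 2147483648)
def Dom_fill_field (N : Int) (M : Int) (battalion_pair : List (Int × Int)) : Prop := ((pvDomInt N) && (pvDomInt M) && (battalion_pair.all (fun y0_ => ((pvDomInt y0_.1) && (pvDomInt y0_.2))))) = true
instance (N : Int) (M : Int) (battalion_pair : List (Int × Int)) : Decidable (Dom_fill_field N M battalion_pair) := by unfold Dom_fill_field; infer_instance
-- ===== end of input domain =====

-- B builds an all-zero M×N grid and marks each in-range pair once, instead of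
-- scanning battalion_pair for every cell.

-- ===== PORT A =====
-- for x in range(M): row built by appending (1 if (y,x) in battalion_pair else 0) for y in range(N)
def fill_field (N : Int) (M : Int) (battalion_pair : List (Int × Int)) : List (List Int) :=
  (PySem.List.pyRange 0 M 1).foldl
    (fun state_square x =>
      state_square ++
        [(PySem.List.pyRange 0 N 1).foldl
          (fun row y => row ++ [if (y, x) ∈ battalion_pair then (1 : Int) else 0]) []])
    []

-- ===== PORT B =====
-- grid = [[0]*N for _ in range(M)]; for (col,row) in battalion_pair: if in range, grid[row][col] = 1
def fill_field_alt (N : Int) (M : Int) (battalion_pair : List (Int × Int)) : List (List Int) :=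
  let grid := List.replicate M.toNat (List.replicate N.toNat (0 : Int))
  battalion_pair.foldl
    (fun g p =>
      if 0 ≤ p.1 ∧ p.1 < N ∧ 0 ≤ p.2 ∧ p.2 < M then
        g.set p.2.toNat ((g.getD p.2.toNat []).set p.1.toNat 1)
      else g)
    grid

-- ===== PRECONDITION & SPEC =====
def Spec_fill_field (N : Int) (M : Int) (battalion_pair : List (Int × Int)) (out : List (List Int)) : Prop := out = fill_field_alt N M battalion_pair
instance (N : Int) (M : Int) (battalion_pair : List (Int × Int)) (out : List (List Int)) : Decidable (Spec_fill_field N M battalion_pair out) := by unfold Spec_fill_field; infer_instance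

-- ===== CLAIM (what is proved, stated in full; the proofs are below) =====
def Claim_equal_fill_field : Prop := ∀ (N : Int) (M : Int) (battalion_pair : List (Int × Int)), Dom_fill_field N M battalion_pair → Spec_fill_field N M battalion_pair (fill_field N M battalion_pair)

-- ===== LEMMAS AND PROOFS =====

-- A's append loop is a map
theorem pv_foldl_append {α β : Type} (f : α → β) (l : List α) (s : List β) :
    l.foldl (fun acc x => acc ++ [f x]) s = s ++ l.map f := by
  induction l generalizing s with
  | nil => simp
  | cons a l ih => simp [ih]

-- B's marking step, named
def pvStep (N M : Int) (g : List (List Int)) (p : Int × Int) : List (List Int) :=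
  if 0 ≤ p.1 ∧ p.1 < N ∧ 0 ≤ p.2 ∧ p.2 < M then
    g.set p.2.toNat ((g.getD p.2.toNat []).set p.1.toNat 1)
  else g

theorem pv_alt_eq (N M : Int) (bp : List (Int × Int)) :
    fill_field_alt N M bp =
      bp.foldl (pvStep N M) (List.replicate M.toNat (List.replicate N.toNat 0)) := rfl

theorem pv_getD_set {α : Type} (g : List α) (r : Nat) (v : α) (i : Nat) (d : α) :
    (g.set r v).getD i d = if r = i ∧ r < g.length then v else g.getD i d := by
  simp only [List.getD, List.getElem?_set]
  split_ifs with h1 h2 h3 h3 <;> simp_all <;> omega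

theorem pv_step_length (N M : Int) (g : List (List Int)) (p : Int × Int) :
    (pvStep N M g p).length = g.length := by
  unfold pvStep; split <;> simp

theorem pv_mark_length (N M : Int) (bp : List (Int × Int)) (g : List (List Int)) :
    (bp.foldl (pvStep N M) g).length = g.length := by
  induction bp generalizing g with
  | nil => rfl
  | cons p bp ih => simp only [List.foldl_cons]; rw [ih, pv_step_length]

theorem pv_step_row_length (N M : Int) (g : List (List Int)) (p : Int × Int) (i : Nat) :
    ((pvStep N M g p).getD i []).length = (g.getD i []).length := by
  unfold pvStep; split
  · rw [pv_getD_set]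
    split_ifs with h
    · rw [List.length_set, h.1]
    · rfl
  · rfl

theorem pv_mark_row_length (N M : Int) (bp : List (Int × Int)) (g : List (List Int)) (i : Nat) :
    ((bp.foldl (pvStep N M) g).getD i []).length = (g.getD i []).length := by
  induction bp generalizing g with
  | nil => rfl
  | cons p bp ih => simp only [List.foldl_cons]; rw [ih, pv_step_row_length]

-- entry of a grid
def pvEntry (g : List (List Int)) (i j : Nat) : Int := (g.getD i []).getD j 0

theorem pv_step_entry (N M : Int) (g : List (List Int)) (p : Int × Int)
    (hlen : g.length = M.toNat)
    (hrow : ∀ i, i < g.length → (g.getD i []).length = N.toNat)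
    (i j : Nat) (hi : i < M.toNat) (hj : j < N.toNat) :
    pvEntry (pvStep N M g p) i j =
      if p = ((j : Int), (i : Int)) then 1 else pvEntry g i j := by
  obtain ⟨p1, p2⟩ := p
  have hig : i < g.length := by omega
  have hrl : (g.getD i []).length = N.toNat := hrow i hig
  unfold pvStep pvEntry
  simp only [Prod.mk.injEq]
  by_cases hg : 0 ≤ p1 ∧ p1 < N ∧ 0 ≤ p2 ∧ p2 < M
  · rw [if_pos hg, pv_getD_set]
    by_cases h2 : p2.toNat = i ∧ p2.toNat < g.length
    · rw [if_pos h2]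
      obtain ⟨h2a, h2b⟩ := h2
      rw [h2a, pv_getD_set]
      have hcond : (p1.toNat = j ∧ p1.toNat < (g.getD i []).length) ↔ (p1 = (j : Int) ∧ p2 = (i : Int)) := by
        rw [hrl]; omega
      split_ifs with hA hB hB
      · rfl
      · exact absurd (hcond.mp hA) hB
      · exact absurd (hcond.mpr hB) hA
      · rfl
    · rw [if_neg h2, if_neg (by intro hpe; exact h2 (by omega))]
  · rw [if_neg hg, if_neg (by intro hpe; exact hg (by omega))]

theorem pv_mark_entry (N M : Int) (bp : List (Int × Int)) (g : List (List Int))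
    (hlen : g.length = M.toNat)
    (hrow : ∀ i, i < g.length → (g.getD i []).length = N.toNat)
    (i j : Nat) (hi : i < M.toNat) (hj : j < N.toNat) :
    pvEntry (bp.foldl (pvStep N M) g) i j =
      if ((j : Int), (i : Int)) ∈ bp then 1 else pvEntry g i j := by
  induction bp generalizing g with
  | nil => simp
  | cons p bp ih =>
      simp only [List.foldl_cons, List.mem_cons]
      rw [ih (pvStep N M g p) (by rw [pv_step_length]; exact hlen)
            (fun k hk => by
              rw [pv_step_row_length]
              exact hrow k (by rwa [pv_step_length] at hk)),
          pv_step_entry N M g p hlen hrow i j hi hj]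
      by_cases hmem : ((j : Int), (i : Int)) ∈ bp
      · simp [hmem]
      · by_cases hp : p = ((j : Int), (i : Int)) <;> simp [hp, hmem, eq_comm]

-- ===== VERDICT (by name: the statement is the Claim_ definition above) =====
theorem fill_field_spec : Claim_equal_fill_field := by
  intro N M bp _
  unfold Spec_fill_field fill_field
  rw [pv_alt_eq, pv_foldl_append, List.nil_append]
  set G := bp.foldl (pvStep N M) (List.replicate M.toNat (List.replicate N.toNat 0)) with hG
  have hlen : (List.replicate M.toNat (List.replicate N.toNat (0 : Int))).length = M.toNat := by
    simp
  have hrow : ∀ i, i < (List.replicate M.toNat (List.replicate N.toNat (0 : Int))).length →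
      ((List.replicate M.toNat (List.replicate N.toNat (0 : Int))).getD i []).length = N.toNat := by
    intro i hi
    simp only [List.length_replicate] at hi
    simp [List.getD, List.getElem?_eq_getElem, hi]
  have hGl : G.length = M.toNat := by rw [hG, pv_mark_length, hlen]
  apply List.ext_getElem
  · simp [PySem.List.pyRange_one, hGl]
  · intro i h1 h2
    have hi : i < M.toNat := by rwa [hGl] at h2
    simp only [PySem.List.pyRange_one, List.getElem_map, List.getElem_range,
      List.length_map, List.length_range] at h1 ⊢
    rw [pv_foldl_append, List.nil_append]
    have hGr : (G.getD i []).length = N.toNat := by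
      rw [hG, pv_mark_row_length]
      exact hrow i (by rw [hlen]; exact hi)
    have hGi : G[i] = G.getD i [] := (List.getD_eq_getElem G [] h2).symm
    rw [hGi]
    apply List.ext_getElem
    · rw [hGr]; simp [PySem.List.pyRange_one]
    · intro j j1 j2
      have hj : j < N.toNat := by rwa [hGr] at j2
      simp only [PySem.List.pyRange_one, List.getElem_map, List.getElem_range]
      rw [← List.getD_eq_getElem (G.getD i []) 0 j2]
      have hme := pv_mark_entry N M bp _ hlen hrow i j hi hj
      rw [← hG] at hme
      unfold pvEntry at hme
      rw [hme]
      have hz : (List.replicate M.toNat (List.replicate N.toNat (0:Int))).getD i [] =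
          List.replicate N.toNat (0 : Int) := by
        simp [List.getD, List.getElem?_eq_getElem, hi]
      rw [hz]
      by_cases hmem : ((j : Int), (i : Int)) ∈ bp <;> simp [hmem, hj]
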